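-- pv_equiv track=rewrite | github.com/daniel-reich/ubiquitous-fiesta | ehyZvt6AJF4rKFfXT_18.py | uncensor
-- ===== SOURCE A (Python) =====
-- def uncensor(txt, vowels):
--   txtLst = []
--   txtLst[:] = txt
--   txt = ""
--   for i in txtLst:
--     if i == "*":
--       t = vowels[0]
--       vowels = vowels[1:]
--     else:
--       t = i
--     txt += t
--   return txt
-- ===== SOURCE B (Python) =====
-- def uncensor(txt, vowels):
--   parts = txt.split('*')
--   pieces = [parts[0]]
--   for k, part in enumerate(parts[1:]):
--     pieces.append(vowels[k])
--     pieces.append(part)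
--   return ''.join(pieces)
-- ===== Notes on version B (the rewrite author's own statement) =====
-- stated objective: faster
-- what changed: B splits txt on '*' once and interleaves the literal segments with positionally indexed vowels in one join, instead of A's character-by-character scan that re-slices the vowels list and rebuilds the string at each step.
import Mathlib
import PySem

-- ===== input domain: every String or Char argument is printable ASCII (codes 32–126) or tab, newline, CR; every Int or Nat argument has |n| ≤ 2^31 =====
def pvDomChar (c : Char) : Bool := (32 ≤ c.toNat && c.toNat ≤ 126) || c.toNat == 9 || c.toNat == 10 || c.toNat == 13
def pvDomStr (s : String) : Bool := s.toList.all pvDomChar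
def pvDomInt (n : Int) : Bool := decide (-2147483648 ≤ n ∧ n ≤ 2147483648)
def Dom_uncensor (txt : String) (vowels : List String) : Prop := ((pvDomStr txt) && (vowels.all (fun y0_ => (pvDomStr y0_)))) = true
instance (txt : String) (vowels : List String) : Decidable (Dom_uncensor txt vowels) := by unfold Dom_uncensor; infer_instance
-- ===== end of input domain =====

-- B replaces A's char-by-char scan (which slices the vowels list at each '*') by one split on '*'
-- followed by an interleave of the segments with positionally indexed vowels; alternative decomposition.

-- ===== PORT A =====
-- the for-loop over the characters of txt, with state (vowels, accumulated chars);
-- vowels[0] is PySem.List.pyGet? (none = IndexError, excluded by Pre_; .getD "" there)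
def uncensorGo : List Char → List String → List Char → List Char
  | [], _, acc => acc
  | c :: cs, vs, acc =>
    if c = '*' then
      uncensorGo cs (PySem.List.slice vs (some 1) none) (acc ++ ((PySem.List.pyGet? vs 0).getD "").toList)
    else
      uncensorGo cs vs (acc ++ [c])

def uncensor (txt : String) (vowels : List String) : String :=
  String.ofList (uncensorGo txt.toList vowels [])

-- ===== PORT B =====
-- parts = txt.split('*') ; pieces = [parts[0]] ; for k, part in enumerate(parts[1:]): append vowels[k], part ; ''.join
-- split? is none only for sep = "", never here; vowels[k] is pyGet? (IndexError excluded by Pre_)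
def uncensor_alt (txt : String) (vowels : List String) : String :=
  let parts := (PySem.Str.split? txt "*").getD []
  let pieces :=
    (PySem.List.enumerate (PySem.List.slice parts (some 1) none)).foldl
      (fun ps kp => ps ++ [((PySem.List.pyGet? vowels kp.1).getD ""), kp.2])
      [((PySem.List.pyGet? parts 0).getD "")]
  PySem.Str.join "" pieces

-- ===== PRECONDITION & SPEC =====
-- A raises IndexError (vowels[0] on an exhausted list) exactly when txt has more '*' than vowels has elements
def Pre_uncensor (txt : String) (vowels : List String) : Prop :=
  txt.toList.count '*' ≤ vowels.length
instance (txt : String) (vowels : List String) : Decidable (Pre_uncensor txt vowels) := by unfold Pre_uncensor; infer_instance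

def pvWitness_uncensor : String × List String := ("wh*r* is it", ["e", "e"])

def Spec_uncensor (txt : String) (vowels : List String) (out : String) : Prop := out = uncensor_alt txt vowels
instance (txt : String) (vowels : List String) (out : String) : Decidable (Spec_uncensor txt vowels out) := by unfold Spec_uncensor; infer_instance

-- ===== CLAIM (what is proved, stated in full; the proofs are below) =====
def Claim_equal_uncensor : Prop := ∀ (txt : String) (vowels : List String), Dom_uncensor txt vowels → Pre_uncensor txt vowels → Spec_uncensor txt vowels (uncensor txt vowels)

-- ===== LEMMAS AND PROOFS =====

-- reference splitter: what txt.split('*') yields, as structural recursion over the chars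
def splitStar : List Char → List (List Char)
  | [] => [[]]
  | c :: cs => if c = '*' then [] :: splitStar cs else
      match splitStar cs with
      | [] => [[c]]
      | p :: ps => (c :: p) :: ps

lemma splitStar_ne_nil (cs : List Char) : splitStar cs ≠ [] := by
  cases cs with
  | nil => simp [splitStar]
  | cons c cs =>
    simp only [splitStar]
    split
    · simp
    · cases h : splitStar cs <;> simp

-- prepend a prefix onto the first piece
def preHead (pre : List Char) : List (List Char) → List (List Char)
  | [] => [pre]
  | p :: ps => (pre ++ p) :: ps

lemma splitOn_go_star (l : List Char) : ∀ (fuel : Nat) (cur : List Char) (acc : List (List Char)),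
    l.length ≤ fuel →
    PySem.Chars.splitOn.go ['*'] fuel l cur acc = acc.reverse ++ preHead cur.reverse (splitStar l) := by
  induction l with
  | nil =>
    intro fuel cur acc _
    cases fuel <;> simp [PySem.Chars.splitOn.go, splitStar, preHead]
  | cons c cs ih =>
    intro fuel cur acc hf
    cases fuel with
    | zero => simp at hf
    | succ fuel =>
      by_cases hc : c = '*'
      · subst hc
        rw [PySem.Chars.splitOn.go]
        simp only [List.isPrefixOf, beq_self_eq_true, Bool.true_and, if_pos]
        rw [show List.drop ['*'].length ('*' :: cs) = cs from rfl,
          ih fuel [] (cur.reverse :: acc) (by simpa using Nat.le_of_succ_le_succ hf)]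
        simp only [splitStar]
        rcases h : splitStar cs with _ | ⟨p, ps⟩
        · exact absurd h (splitStar_ne_nil cs)
        · simp [preHead]
      · rw [PySem.Chars.splitOn.go]
        have hpre : ['*'].isPrefixOf (c :: cs) = false := by
          simp [List.isPrefixOf]
          exact fun h => absurd h.symm hc
        rw [hpre]
        simp only [Bool.false_eq_true, if_false]
        rw [ih fuel (c :: cur) acc (by simpa using Nat.le_of_succ_le_succ hf)]
        simp only [splitStar, if_neg hc, List.reverse_cons]
        rcases h : splitStar cs with _ | ⟨p, ps⟩
        · exact absurd h (splitStar_ne_nil cs)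
        · simp [preHead]

lemma splitOn_star (cs : List Char) : PySem.Chars.splitOn cs ['*'] = splitStar cs := by
  have := splitOn_go_star cs (cs.length + 1) [] [] (by omega)
  rw [PySem.Chars.splitOn] at *
  rcases h : splitStar cs with _ | ⟨p, ps⟩
  · exact absurd h (splitStar_ne_nil cs)
  · simpa [preHead, h] using this

lemma join_empty_sep (ps : List (List Char)) : PySem.Chars.join [] ps = ps.flatten := by
  induction ps with
  | nil => simp [PySem.Chars.join_nil]
  | cons p ps ih =>
    cases ps with
    | nil => simp [PySem.Chars.join_singleton]
    | cons q rest => rw [PySem.Chars.join_cons_cons]; simp_all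

-- B's interleave, as a spec on the segment list and the remaining vowels
def flatSeg : List (List Char) → List String → List Char
  | [], _ => []
  | p :: ps, vs => (vs.headD "").toList ++ p ++ flatSeg ps vs.tail

def interleave : List (List Char) → List String → List Char
  | [], _ => []
  | p :: ps, vs => p ++ flatSeg ps vs

-- the fold over enumerate builds exactly the interleave, vowels consumed from position n on
lemma foldl_enum_flatSeg (ps : List (List Char)) : ∀ (n : Nat) (vs : List String) (init : List String),
    (((PySem.List.enumerate (ps.map String.ofList) (n : Int)).foldl
        (fun acc kp => acc ++ [((PySem.List.pyGet? vs kp.1).getD ""), kp.2]) init).map String.toList).flatten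
      = (init.map String.toList).flatten ++ flatSeg ps (vs.drop n) := by
  induction ps with
  | nil => intro n vs init; simp [flatSeg]
  | cons p ps ih =>
    intro n vs init
    simp only [List.map_cons, PySem.List.enumerate, List.foldl_cons]
    have hcast : (n : Int) + 1 = ((n + 1 : Nat) : Int) := by push_cast; ring
    rw [hcast, ih (n + 1) vs]
    simp only [flatSeg, PySem.List.pyGet?_natCast]
    have hv : (vs.drop n).headD "" = vs[n]?.getD "" := by
      simp [List.headD_eq_head?_getD, List.head?_drop]
    have ht : (vs.drop n).tail = vs.drop (n + 1) := by
      rw [← List.drop_drop, List.drop_one]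
    rw [hv, ht]; simp

-- main invariant: A's loop produces the interleave of the split segments with the vowels
lemma uncensorGo_eq (cs : List Char) : ∀ (vs : List String) (acc : List Char),
    uncensorGo cs vs acc = acc ++ interleave (splitStar cs) vs := by
  induction cs with
  | nil => intro vs acc; simp [uncensorGo, splitStar, interleave, flatSeg]
  | cons c cs ih =>
    intro vs acc
    by_cases hc : c = '*'
    · subst hc
      rw [uncensorGo, if_pos rfl, ih]
      have hs : PySem.List.slice vs (some 1) none = vs.tail := by
        rw [PySem.List.slice_from vs (by norm_num)]
        simp [List.drop_one]
      have hg : (PySem.List.pyGet? vs 0).getD "" = vs.headD "" := by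
        have := PySem.List.pyGet?_natCast vs 0
        simp only [Nat.cast_zero] at this
        simp [this, List.headD_eq_head?_getD, List.head?_eq_getElem?]
      rw [hs, hg]
      simp only [splitStar, interleave]
      rcases h : splitStar cs with _ | ⟨p, ps⟩
      · exact absurd h (splitStar_ne_nil cs)
      · simp [flatSeg]
    · rw [uncensorGo, if_neg hc, ih]
      simp only [splitStar, if_neg hc]
      rcases h : splitStar cs with _ | ⟨p, ps⟩
      · exact absurd h (splitStar_ne_nil cs)
      · simp [interleave]

-- B's value, reduced to the same interleave
lemma uncensor_alt_toList (txt : String) (vowels : List String) :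
    (uncensor_alt txt vowels).toList = interleave (splitStar txt.toList) vowels := by
  rw [uncensor_alt]
  have hsplit : (PySem.Str.split? txt "*").getD [] = (splitStar txt.toList).map String.ofList := by
    rw [PySem.Str.split?, PySem.Chars.split?]
    simp [splitOn_star]
  rcases h : splitStar txt.toList with _ | ⟨p, ps⟩
  · exact absurd h (splitStar_ne_nil txt.toList)
  · simp only [hsplit, h, List.map_cons]
    have hs : PySem.List.slice (String.ofList p :: ps.map String.ofList) (some 1) none
        = ps.map String.ofList := by
      rw [PySem.List.slice_from _ (by norm_num)]
      simp
    have hg : (PySem.List.pyGet? (String.ofList p :: ps.map String.ofList) 0).getD ""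
        = String.ofList p := by
      have := PySem.List.pyGet?_natCast (String.ofList p :: ps.map String.ofList) 0
      simp only [Nat.cast_zero] at this
      simp only [this, List.getElem?_cons_zero, Option.getD_some]
    rw [hs, hg, PySem.Str.toList_join, show ("".toList : List Char) = [] from rfl, join_empty_sep]
    have := foldl_enum_flatSeg ps 0 vowels [String.ofList p]
    simp only [Nat.cast_zero, List.drop_zero] at this
    rw [this]
    simp [interleave]

-- ===== VERDICT (by name: the statement is the Claim_ definition above) =====
theorem uncensor_spec : Claim_equal_uncensor := by
  intro txt vowels _ _
  unfold Spec_uncensor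
  apply String.toList_inj.mp
  rw [uncensor_alt_toList, uncensor]
  simp [uncensorGo_eq]
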